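-- pv_equiv track=rewrite | github.com/humenda/muk | scripts/linkerwrapper.py | filter_linker_flavour
-- ===== SOURCE A (Python) =====
-- def filter_linker_flavour(args):
--     """Remove `-flavor gnu`."""
--     new_args = []
--     ignore = False
--     for arg in args:
--         if ignore:
--             ignore = False # ignore this argument
--         else:
--             if arg == '-flavor':
--                 ignore = True
--             else:
--                 new_args.append(arg)
--     return new_args
-- ===== SOURCE B (Python) =====
-- def filter_linker_flavour(args):
--     """Remove `-flavor gnu`."""
--     out = []
--     while True:
--         try:
--             i = args.index('-flavor')
--         except ValueError:
--             return out + args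
--         out += args[:i]
--         args = args[i + 2:]
-- ===== Notes on version B (the rewrite author's own statement) =====
-- stated objective: alternative
-- what changed: Instead of A's element-wise loop with a cross-iteration ignore flag, B repeatedly locates the next '-flavor' with list.index, appends the slice before it, and skips two elements via slicing, so it works on whole segments between flags.
import Mathlib
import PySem

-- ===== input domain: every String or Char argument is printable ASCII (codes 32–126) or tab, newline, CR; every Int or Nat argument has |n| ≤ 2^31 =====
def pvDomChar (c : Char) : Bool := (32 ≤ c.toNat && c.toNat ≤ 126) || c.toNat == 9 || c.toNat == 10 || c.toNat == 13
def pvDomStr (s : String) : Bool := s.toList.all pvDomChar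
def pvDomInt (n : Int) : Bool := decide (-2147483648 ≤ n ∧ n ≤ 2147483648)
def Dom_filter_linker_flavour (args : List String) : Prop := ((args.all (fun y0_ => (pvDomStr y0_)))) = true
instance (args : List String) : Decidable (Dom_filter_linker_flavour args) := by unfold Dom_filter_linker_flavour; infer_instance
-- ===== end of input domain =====

-- B replaces A's per-element ignore-flag loop by repeated list.index search plus slicing (segment-wise); same value, return value only.


-- ===== PORT A =====
-- fold over args carrying (new_args, ignore), exactly A's loop
def filter_linker_flavour (args : List String) : List String :=
  (args.foldl (fun (st : List String × Bool) arg =>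
    if st.2 then (st.1, false)
    else if arg = "-flavor" then (st.1, true)
    else (st.1 ++ [arg], st.2)) ([], false)).1

-- ===== PORT B =====
-- Source B's while loop: find the next '-flavor' (none = ValueError → return out + args),
-- keep the slice before it, continue on the slice two past it
def flfAltGo (out args : List String) : List String :=
  match h : PySem.List.index? args "-flavor" with
  | none => out ++ args
  | some i =>
      flfAltGo (out ++ PySem.List.slice args none (some (i : Int)))
               (PySem.List.slice args (some ((i : Int) + 2)) none)
termination_by args.length
decreasing_by
  have hi := PySem.List.getElem_of_index?_eq_some h
  obtain ⟨hk, -, -⟩ := hi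
  have : ((i : Int) + 2) = ((i + 2 : Nat) : Int) := by push_cast; ring
  rw [this, PySem.List.slice_from_natCast]
  simp [List.length_drop]
  omega

def filter_linker_flavour_alt (args : List String) : List String := flfAltGo [] args

-- ===== PRECONDITION & SPEC =====
def Spec_filter_linker_flavour (args : List String) (out : List String) : Prop := out = filter_linker_flavour_alt args
instance (args : List String) (out : List String) : Decidable (Spec_filter_linker_flavour args out) := by unfold Spec_filter_linker_flavour; infer_instance

-- ===== CLAIM (what is proved, stated in full; the proofs are below) =====
def Claim_equal_filter_linker_flavour : Prop := ∀ (args : List String), Dom_filter_linker_flavour args → Spec_filter_linker_flavour args (filter_linker_flavour args)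

-- ===== LEMMAS AND PROOFS =====
-- reference recursion: the flag-free "drop '-flavor' and its successor" function
def flfSpec (args : List String) : List String :=
  match args with
  | [] => []
  | arg :: rest =>
    if arg = "-flavor" then
      match rest with
      | [] => []
      | _ :: rest' => flfSpec rest'
    else arg :: flfSpec rest

theorem flfSpec_of_not_mem (args : List String) (h : "-flavor" ∉ args) : flfSpec args = args := by
  induction args with
  | nil => rfl
  | cons x xs ih =>
      simp only [List.mem_cons, not_or] at h
      have e : flfSpec (x :: xs) = x :: flfSpec xs := by
        unfold flfSpec; rw [if_neg (fun hxx => h.1 hxx.symm), ← flfSpec.eq_def]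
      rw [e, ih h.2]

theorem flfSpec_of_index (args : List String) (i : Nat)
    (h : PySem.List.index? args "-flavor" = some i) :
    flfSpec args = args.take i ++ flfSpec (args.drop (i + 2)) := by
  induction args generalizing i with
  | nil => simp [PySem.List.index?] at h
  | cons x xs ih =>
      by_cases hx : x = "-flavor"
      · subst hx
        rw [PySem.List.index?_cons_self] at h
        cases h
        cases xs <;> rfl
      · rw [PySem.List.index?_cons_of_ne xs hx] at h
        cases hj : PySem.List.index? xs "-flavor" with
        | none => rw [hj] at h; simp at h
        | some j =>
            rw [hj] at h
            simp only [Option.map_some] at h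
            cases h
            have e : flfSpec (x :: xs) = x :: flfSpec xs := by
              unfold flfSpec; rw [if_neg hx, ← flfSpec.eq_def]
            have hd : j + 1 + 2 = (j + 2) + 1 := by omega
            rw [e, ih j hj, hd]
            simp

theorem flfAltGo_eq (args out : List String) : flfAltGo out args = out ++ flfSpec args := by
  induction out, args using flfAltGo.induct with
  | case1 out args h =>
      rw [PySem.List.index?_eq_none_iff] at h
      rw [flfAltGo]
      simp only [PySem.List.index?_eq_idxOf?]
      rw [List.idxOf?_eq_none_iff.mpr h, flfSpec_of_not_mem args h]
  | case2 out args i h ih =>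
      rw [flfAltGo]
      simp only [PySem.List.index?_eq_idxOf?] at h ⊢
      rw [h]
      show flfAltGo (out ++ PySem.List.slice args none (some (i : Int)))
             (PySem.List.slice args (some ((i : Int) + 2)) none) = out ++ flfSpec args
      rw [ih, flfSpec_of_index args i (by simp [PySem.List.index?_eq_idxOf?, h])]
      have h2 : ((i : Int) + 2) = ((i + 2 : Nat) : Int) := by push_cast; ring
      rw [h2, PySem.List.slice_from_natCast, PySem.List.slice_to_natCast]
      simp

theorem flf_fold_inv (args : List String) (acc : List String) :
    (args.foldl (fun (st : List String × Bool) arg =>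
      if st.2 then (st.1, false)
      else if arg = "-flavor" then (st.1, true)
      else (st.1 ++ [arg], st.2)) (acc, false)).1 = acc ++ flfSpec args := by
  induction args using flfSpec.induct generalizing acc with
  | case1 => simp [flfSpec]
  | case2 => simp [flfSpec, List.foldl]
  | case3 y rest ih => simp [List.foldl, flfSpec, ih acc]
  | case4 arg rest h ih =>
      simp [List.foldl, h, ih (acc ++ [arg])]
      cases rest <;> simp [flfSpec, h]

-- ===== VERDICT (by name: the statement is the Claim_ definition above) =====
theorem filter_linker_flavour_spec : Claim_equal_filter_linker_flavour := by
  intro args _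
  unfold Spec_filter_linker_flavour filter_linker_flavour filter_linker_flavour_alt
  rw [flfAltGo_eq]
  simpa using flf_fold_inv args []
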